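-- pv_equiv track=rewrite | github.com/MateusMalves/oracle-one-data-science | 01-formacao_modelagem-de-dados-com-python/01-primeiros-passos/04-estruturas-de-repeticao/desafio_hora-da-pratica.py | calcular_distribuicao_idades
-- ===== SOURCE A (Python) =====
-- def calcular_distribuicao_idades(idades):
--     if len(idades) == 0:
--         return None
--     else:
--         distribuicao = {
--             '[0-25]': 0,
--             '[26-50]': 0,
--             '[51-75]': 0,
--             '[76-100]': 0
--         }
--         for idade in idades:
--             if idade < 26:
--                 distribuicao['[0-25]'] += 1
--             elif idade < 51:
--                 distribuicao['[26-50]'] += 1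
--             elif idade < 76:
--                 distribuicao['[51-75]'] += 1
--             elif idade < 101:
--                 distribuicao['[76-100]'] += 1
--         return distribuicao
-- ===== SOURCE B (Python) =====
-- # Staged passes: count ages below each boundary (four cumulative threshold counts),
-- # then take successive differences to get the bucket counts; no per-element bucketing.
-- def _abaixo_de(idades, t):
--     return sum(1 for x in idades if x < t)
--
-- def calcular_distribuicao_idades(idades):
--     if not idades:
--         return None
--     c26 = _abaixo_de(idades, 26)
--     c51 = _abaixo_de(idades, 51)
--     c76 = _abaixo_de(idades, 76)
--     c101 = _abaixo_de(idades, 101)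
--     return {'[0-25]': c26, '[26-50]': c51 - c26,
--             '[51-75]': c76 - c51, '[76-100]': c101 - c76}
-- ===== Notes on version B (the rewrite author's own statement) =====
-- stated objective: alternative
-- what changed: Instead of bucketing each age in one pass with an if/elif cascade, B makes four staged passes computing cumulative threshold counts (ages below 26, 51, 76, 101) and derives each bucket as the difference of consecutive cumulative counts.
import Mathlib
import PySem

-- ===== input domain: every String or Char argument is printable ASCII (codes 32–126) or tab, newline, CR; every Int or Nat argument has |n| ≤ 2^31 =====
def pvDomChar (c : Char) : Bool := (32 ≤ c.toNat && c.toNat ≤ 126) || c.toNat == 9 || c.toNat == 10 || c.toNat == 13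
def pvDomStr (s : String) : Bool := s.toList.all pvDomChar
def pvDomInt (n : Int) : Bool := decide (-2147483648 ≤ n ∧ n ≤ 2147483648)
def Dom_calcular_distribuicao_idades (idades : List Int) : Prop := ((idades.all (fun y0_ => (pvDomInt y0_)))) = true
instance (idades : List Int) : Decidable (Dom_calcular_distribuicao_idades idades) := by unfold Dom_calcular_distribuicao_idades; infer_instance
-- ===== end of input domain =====

-- B replaces A's single-pass if/elif bucketing by four staged cumulative threshold
-- counts whose successive differences are the bucket counts (objective: alternative).

-- ===== PORT A =====
def pvStepA (d : PySem.Dict String Int) (idade : Int) : PySem.Dict String Int :=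
  if idade < 26 then d.insert "[0-25]" (d.getD "[0-25]" 0 + 1)
  else if idade < 51 then d.insert "[26-50]" (d.getD "[26-50]" 0 + 1)
  else if idade < 76 then d.insert "[51-75]" (d.getD "[51-75]" 0 + 1)
  else if idade < 101 then d.insert "[76-100]" (d.getD "[76-100]" 0 + 1)
  else d

def calcular_distribuicao_idades (idades : List Int) : Option (List (String × Int)) :=
  if idades.length = 0 then none
  else
    let distribuicao : PySem.Dict String Int :=
      ((((PySem.Dict.empty).insert "[0-25]" 0).insert "[26-50]" 0).insert "[51-75]" 0).insert "[76-100]" 0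
    some ((idades.foldl pvStepA distribuicao).items)

-- ===== PORT B =====
-- sum(1 for x in idades if x < t)
def pvAbaixoDe (idades : List Int) (t : Int) : Int :=
  idades.foldl (fun acc x => if x < t then acc + 1 else acc) 0

def calcular_distribuicao_idades_alt (idades : List Int) : Option (List (String × Int)) :=
  if idades = [] then none
  else
    let c26 := pvAbaixoDe idades 26
    let c51 := pvAbaixoDe idades 51
    let c76 := pvAbaixoDe idades 76
    let c101 := pvAbaixoDe idades 101
    some [("[0-25]", c26), ("[26-50]", c51 - c26),
          ("[51-75]", c76 - c51), ("[76-100]", c101 - c76)]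

-- ===== PRECONDITION & SPEC =====
def Spec_calcular_distribuicao_idades (idades : List Int) (out : Option (List (String × Int))) : Prop := out = calcular_distribuicao_idades_alt idades
instance (idades : List Int) (out : Option (List (String × Int))) : Decidable (Spec_calcular_distribuicao_idades idades out) := by unfold Spec_calcular_distribuicao_idades; infer_instance

-- ===== CLAIM (what is proved, stated in full; the proofs are below) =====
def Claim_equal_calcular_distribuicao_idades : Prop := ∀ (idades : List Int), Dom_calcular_distribuicao_idades idades → Spec_calcular_distribuicao_idades idades (calcular_distribuicao_idades idades)

-- ===== LEMMAS AND PROOFS =====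

-- the dict A maintains, for arbitrary counter values
def pvDictOf (a b c d : Int) : PySem.Dict String Int :=
  PySem.Dict.mk [("[0-25]", a), ("[26-50]", b), ("[51-75]", c), ("[76-100]", d)]

lemma pvStepA_dictOf (a b c d x : Int) :
    pvStepA (pvDictOf a b c d) x =
      if x < 26 then pvDictOf (a + 1) b c d
      else if x < 51 then pvDictOf a (b + 1) c d
      else if x < 76 then pvDictOf a b (c + 1) d
      else if x < 101 then pvDictOf a b c (d + 1)
      else pvDictOf a b c d := by
  rcases lt_or_ge x 26 with h1 | h1
  · simp [pvStepA, pvDictOf, PySem.Dict.insert, PySem.Dict.getD, PySem.Dict.get?, h1]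
  rcases lt_or_ge x 51 with h2 | h2
  · simp [pvStepA, pvDictOf, PySem.Dict.insert, PySem.Dict.getD, PySem.Dict.get?,
      h2, not_lt_of_ge h1]
  rcases lt_or_ge x 76 with h3 | h3
  · simp [pvStepA, pvDictOf, PySem.Dict.insert, PySem.Dict.getD, PySem.Dict.get?,
      h3, not_lt_of_ge h1, not_lt_of_ge h2]
  rcases lt_or_ge x 101 with h4 | h4
  · simp [pvStepA, pvDictOf, PySem.Dict.insert, PySem.Dict.getD, PySem.Dict.get?,
      h4, not_lt_of_ge h1, not_lt_of_ge h2, not_lt_of_ge h3]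
  · simp [pvStepA,
      not_lt_of_ge h1, not_lt_of_ge h2, not_lt_of_ge h3, not_lt_of_ge h4]

-- shifting the accumulator of B's counting fold
lemma pvAbaixo_shift (t : Int) : ∀ (l : List Int) (a : Int),
    l.foldl (fun acc x => if x < t then acc + 1 else acc) a =
      a + l.foldl (fun acc x => if x < t then acc + 1 else acc) 0 := by
  intro l
  induction l with
  | nil => intro a; simp
  | cons x l ih =>
    intro a
    rw [List.foldl_cons, List.foldl_cons,
        ih (if x < t then a + 1 else a), ih (if x < t then (0:Int) + 1 else 0)]
    split_ifs <;> ring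

lemma pvAbaixo_cons (x : Int) (l : List Int) (t : Int) :
    pvAbaixoDe (x :: l) t = (if x < t then 1 else 0) + pvAbaixoDe l t := by
  rw [pvAbaixoDe, List.foldl_cons, pvAbaixo_shift]
  split_ifs <;> simp [pvAbaixoDe]

lemma pvFold_eq : ∀ (l : List Int) (a b c d : Int),
    (l.foldl pvStepA (pvDictOf a b c d)).items =
      [("[0-25]", a + pvAbaixoDe l 26),
       ("[26-50]", b + (pvAbaixoDe l 51 - pvAbaixoDe l 26)),
       ("[51-75]", c + (pvAbaixoDe l 76 - pvAbaixoDe l 51)),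
       ("[76-100]", d + (pvAbaixoDe l 101 - pvAbaixoDe l 76))] := by
  intro l
  induction l with
  | nil => intro a b c d; simp [pvDictOf, pvAbaixoDe]
  | cons x l ih =>
    intro a b c d
    rw [List.foldl_cons, pvStepA_dictOf,
      pvAbaixo_cons x l 26, pvAbaixo_cons x l 51, pvAbaixo_cons x l 76, pvAbaixo_cons x l 101]
    rcases lt_or_ge x 26 with h1 | h1
    · have h2 : x < 51 := by omega
      have h3 : x < 76 := by omega
      have h4 : x < 101 := by omega
      simp only [if_pos h1, if_pos h2, if_pos h3, if_pos h4, ih,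
        List.cons.injEq, Prod.mk.injEq, true_and, and_true]
      omega
    · have h1' := not_lt_of_ge h1
      rcases lt_or_ge x 51 with h2 | h2
      · have h3 : x < 76 := by omega
        have h4 : x < 101 := by omega
        simp only [if_neg h1', if_pos h2, if_pos h3, if_pos h4, ih,
          List.cons.injEq, Prod.mk.injEq, true_and, and_true]
        omega
      · have h2' := not_lt_of_ge h2
        rcases lt_or_ge x 76 with h3 | h3
        · have h4 : x < 101 := by omega
          simp only [if_neg h1', if_neg h2', if_pos h3, if_pos h4, ih,
            List.cons.injEq, Prod.mk.injEq, true_and, and_true]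
          omega
        · have h3' := not_lt_of_ge h3
          rcases lt_or_ge x 101 with h4 | h4
          · simp only [if_neg h1', if_neg h2', if_neg h3', if_pos h4, ih,
              List.cons.injEq, Prod.mk.injEq, true_and, and_true]
            omega
          · have h4' := not_lt_of_ge h4
            simp only [if_neg h1', if_neg h2', if_neg h3', if_neg h4', ih,
              List.cons.injEq, Prod.mk.injEq, true_and, and_true]
            omega

-- ===== VERDICT (by name: the statement is the Claim_ definition above) =====
theorem calcular_distribuicao_idades_spec : Claim_equal_calcular_distribuicao_idades := by
  intro idades _
  unfold Spec_calcular_distribuicao_idades calcular_distribuicao_idades calcular_distribuicao_idades_alt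
  cases idades with
  | nil => rfl
  | cons x l =>
    have h : ((((PySem.Dict.empty).insert "[0-25]" (0:Int)).insert "[26-50]" 0).insert "[51-75]" 0).insert "[76-100]" 0 = pvDictOf 0 0 0 0 := by decide
    simp only [h]
    rw [if_neg (show ¬ (x :: l).length = 0 by simp), if_neg (List.cons_ne_nil x l),
      pvFold_eq (x :: l) 0 0 0 0]
    simp
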